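-- pv_equiv track=rewrite | github.com/tamerlanmustafa/wordwise | backend/src/services/cefr_classifier.py | is_proper_noun_or_fantasy_word
-- ===== SOURCE A (Python) =====
-- def is_proper_noun_or_fantasy_word(word: str) -> bool:
--     """
--     Detect proper nouns and fantasy/constructed words.
--     Returns True if word should be classified as A2 (beginner-friendly).
--
--     Rules:
--     1. Proper nouns (capitalized words like "Harry", "Zootopia")
--     2. Fantasy/constructed words with hyphens or apostrophes
--     3. Words with unusual patterns (mixed case, repeated characters)
--     """
--     if not word or len(word) < 2:
--         return False
--
--     # Rule 1: Proper noun detection (capitalized)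
--     if word[0].isupper():
--         return True
--
--     # Rule 2: Fantasy/constructed words with special characters
--     if '-' in word or "'" in word:
--         return True
--
--     # Rule 3: Words with unusual repeated patterns (e.g., "oooo", "aaaa")
--     if len(word) >= 4:
--         for i in range(len(word) - 3):
--             if word[i] == word[i+1] == word[i+2] == word[i+3]:
--                 return True
--
--     return False
-- ===== SOURCE B (Python) =====
-- def is_proper_noun_or_fantasy_word(word: str) -> bool:
--     if not word or len(word) < 2:
--         return False
--     if word[0].isupper():
--         return True
--     if '-' in word or "'" in word:
--         return True
--     # Rule 3 via a single run-length scan instead of comparing 4-wide windows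
--     run = 1
--     for prev, ch in zip(word, word[1:]):
--         run = run + 1 if ch == prev else 1
--         if run >= 4:
--             return True
--     return False
-- ===== Notes on version B (the rewrite author's own statement) =====
-- stated objective: alternative
-- what changed: Rule 3's sliding-window loop comparing every 4-wide window is replaced by a single run-length scan over adjacent pairs that fires as soon as a run of identical characters reaches length 4 (the guards before it are unchanged).
import Mathlib
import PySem

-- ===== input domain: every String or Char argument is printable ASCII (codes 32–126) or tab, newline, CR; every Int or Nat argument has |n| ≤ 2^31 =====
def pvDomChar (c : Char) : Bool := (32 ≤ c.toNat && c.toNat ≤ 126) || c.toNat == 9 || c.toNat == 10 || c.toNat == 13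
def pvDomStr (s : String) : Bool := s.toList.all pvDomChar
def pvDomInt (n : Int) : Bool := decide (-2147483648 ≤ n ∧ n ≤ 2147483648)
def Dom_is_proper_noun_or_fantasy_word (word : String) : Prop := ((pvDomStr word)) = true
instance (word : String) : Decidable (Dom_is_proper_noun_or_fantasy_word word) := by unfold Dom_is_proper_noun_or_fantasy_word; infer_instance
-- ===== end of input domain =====

-- B replaces A's sliding-window Rule-3 loop by a single run-length scan (objective: alternative, same cost).

-- ===== PORT A =====
-- Rule 3 transliterated: for i in range(len(word)-3): word[i]==word[i+1]==word[i+2]==word[i+3]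
-- (the guard 4 ≤ len keeps every index in range, so getD is exact for Python's indexing here;
-- likewise index 0 for word[0] is in range by the length-≥-2 guard)
def is_proper_noun_or_fantasy_word (word : String) : Bool :=
  let cs := word.toList
  if cs.length < 2 then false          -- `not word or len(word) < 2`
  else if PySem.Chars.isupper (cs.getD 0 ' ') then true   -- word[0].isupper()
  else if cs.contains '-' || cs.contains '\'' then true
  else if 4 ≤ cs.length then
    (List.range (cs.length - 3)).any (fun i =>
      cs.getD i ' ' == cs.getD (i+1) ' ' &&
      cs.getD (i+1) ' ' == cs.getD (i+2) ' ' &&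
      cs.getD (i+2) ' ' == cs.getD (i+3) ' ')
  else false

-- ===== PORT B =====
-- the `for prev, ch in zip(word, word[1:])` run counter of Source B, with its early return
def pvRunScan : List Char → Char → Nat → Bool
  | [], _, _ => false
  | ch :: rest, prev, run =>
    let run' := if ch == prev then run + 1 else 1
    if 4 ≤ run' then true else pvRunScan rest ch run'

def is_proper_noun_or_fantasy_word_alt (word : String) : Bool :=
  match word.toList with
  | [] => false                        -- `not word or len(word) < 2`
  | [_] => false
  | c :: rest =>
    if PySem.Chars.isupper c then true
    else if (c :: rest).contains '-' || (c :: rest).contains '\'' then true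
    else pvRunScan rest c 1

-- ===== PRECONDITION & SPEC =====
def Spec_is_proper_noun_or_fantasy_word (word : String) (out : Bool) : Prop := out = is_proper_noun_or_fantasy_word_alt word
instance (word : String) (out : Bool) : Decidable (Spec_is_proper_noun_or_fantasy_word word out) := by unfold Spec_is_proper_noun_or_fantasy_word; infer_instance

-- ===== CLAIM (what is proved, stated in full; the proofs are below) =====
def Claim_equal_is_proper_noun_or_fantasy_word : Prop := ∀ (word : String), Dom_is_proper_noun_or_fantasy_word word → Spec_is_proper_noun_or_fantasy_word word (is_proper_noun_or_fantasy_word word)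

-- ===== LEMMAS AND PROOFS =====

-- common reference predicate: "some 4 consecutive equal characters"
def pvWin4 : List Char → Bool
  | a :: b :: c :: d :: t => (a == b && b == c && c == d) || pvWin4 (b :: c :: d :: t)
  | _ => false

theorem pvWin4_short (l : List Char) (h : l.length < 4) : pvWin4 l = false := by
  match l with
  | [] => rfl
  | [_] => rfl
  | [_, _] => rfl
  | [_, _, _] => rfl
  | _ :: _ :: _ :: _ :: _ => simp at h; omega

theorem pvWin4_cons_ne {a b : Char} (t : List Char) (h : a ≠ b) :
    pvWin4 (a :: b :: t) = pvWin4 (b :: t) := by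
  match t with
  | [] => rfl
  | [_] => rfl
  | x :: y :: t' =>
    have hb : (a == b) = false := by simp [h]
    simp [pvWin4, hb]

theorem pvWin4_replicate (cur : Char) (k : ℕ) :
    pvWin4 (List.replicate k cur) = decide (4 ≤ k) := by
  match k with
  | 0 => rfl
  | 1 => rfl
  | 2 => rfl
  | 3 => rfl
  | m + 4 =>
    simp only [List.replicate_succ, pvWin4]
    simp

theorem pvWin4_replicate_append {cur c : Char} (h : cur ≠ c) (t : List Char) :
    ∀ k, pvWin4 (List.replicate k cur ++ c :: t) = (decide (4 ≤ k) || pvWin4 (c :: t))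
  | 0 => by simp
  | 1 => by simpa using pvWin4_cons_ne (a := cur) (b := c) t h
  | 2 => by
    have hb : (cur == c) = false := by simp [h]
    show pvWin4 (cur :: cur :: c :: t) = (decide (4 ≤ 2) || pvWin4 (c :: t))
    match t with
    | [] => rfl
    | x :: t' =>
      rw [show pvWin4 (cur :: cur :: c :: x :: t')
          = ((cur == cur && cur == c && c == x) || pvWin4 (cur :: c :: x :: t')) from rfl]
      rw [pvWin4_cons_ne _ h]
      simp [hb]
  | 3 => by
    have hb : (cur == c) = false := by simp [h]
    have h2 := pvWin4_replicate_append (cur := cur) (c := c) h t 2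
    show pvWin4 (cur :: cur :: cur :: c :: t) = (decide (4 ≤ 3) || pvWin4 (c :: t))
    rw [show pvWin4 (cur :: cur :: cur :: c :: t)
        = ((cur == cur && cur == cur && cur == c) || pvWin4 (cur :: cur :: c :: t)) from rfl]
    rw [show (List.replicate 2 cur ++ c :: t) = cur :: cur :: c :: t from rfl] at h2
    rw [h2]
    simp [hb]
  | m + 4 => by
    simp only [List.replicate_succ, List.cons_append, pvWin4]
    simp

theorem pvRunScan_eq_win4 (rest : List Char) :
    ∀ (cur : Char) (k : ℕ), 1 ≤ k → k ≤ 3 →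
      pvRunScan rest cur k = pvWin4 (List.replicate k cur ++ rest) := by
  induction rest with
  | nil =>
    intro cur k _ h3
    have hk : ¬ (4 ≤ k) := by omega
    simp [pvRunScan, pvWin4_replicate, hk]
  | cons ch rest ih =>
    intro cur k h1 h3
    by_cases hc : ch = cur
    · subst hc
      by_cases h4 : 4 ≤ k + 1
      · have hk : k = 3 := by omega
        subst hk
        rw [show pvRunScan (ch :: rest) ch 3 = true by simp [pvRunScan]]
        rw [show (List.replicate 3 ch ++ ch :: rest) = ch :: ch :: ch :: ch :: rest from rfl]
        simp [pvWin4]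
      · have hstep : pvRunScan (ch :: rest) ch k = pvRunScan rest ch (k + 1) := by
          simp [pvRunScan, h4]
        rw [hstep, ih ch (k + 1) (by omega) (by omega)]
        congr 1
        rw [show List.replicate k ch ++ ch :: rest
            = (List.replicate k ch ++ [ch]) ++ rest by simp, ← List.replicate_succ']
    · have hb : (ch == cur) = false := by simp [hc]
      have hstep : pvRunScan (ch :: rest) cur k = pvRunScan rest ch 1 := by
        simp [pvRunScan, hb]
      have hk : ¬ (4 ≤ k) := by omega
      rw [hstep, ih ch 1 (by omega) (by omega),
        show (List.replicate 1 ch ++ rest) = ch :: rest from rfl,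
        pvWin4_replicate_append (Ne.symm hc) rest k]
      simp [hk]

-- A's Rule-3 block, as it appears in the port
def pvRuleA (cs : List Char) : Bool :=
  if 4 ≤ cs.length then
    (List.range (cs.length - 3)).any (fun i =>
      cs.getD i ' ' == cs.getD (i+1) ' ' &&
      cs.getD (i+1) ' ' == cs.getD (i+2) ' ' &&
      cs.getD (i+2) ' ' == cs.getD (i+3) ' ')
  else false

theorem pvRuleA_eq_win4 : ∀ cs : List Char, pvRuleA cs = pvWin4 cs := by
  intro cs
  induction cs using pvWin4.induct with
  | case2 l h =>
    have hlen : l.length < 4 := by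
      rcases l with _|⟨a, _|⟨b, _|⟨c, _|⟨d, t⟩⟩⟩⟩
      · simp
      · simp
      · simp
      · simp
      · exact absurd rfl (h a b c d t)
    rw [pvWin4_short l hlen]
    have : ¬ (4 ≤ l.length) := by omega
    simp [pvRuleA, this]
  | case1 a b c d t ih =>
    have hlen4 : 4 ≤ (a :: b :: c :: d :: t).length := by simp
    have hsub : (a :: b :: c :: d :: t).length - 3 = t.length + 1 := by simp
    simp only [pvRuleA, if_pos hlen4]
    rw [hsub, List.range_succ_eq_map, List.any_cons, List.any_map]
    have hfun : ((fun i : ℕ =>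
        (a :: b :: c :: d :: t).getD i ' ' == (a :: b :: c :: d :: t).getD (i+1) ' ' &&
        (a :: b :: c :: d :: t).getD (i+1) ' ' == (a :: b :: c :: d :: t).getD (i+2) ' ' &&
        (a :: b :: c :: d :: t).getD (i+2) ' ' == (a :: b :: c :: d :: t).getD (i+3) ' ') ∘ Nat.succ)
        = (fun i : ℕ =>
        (b :: c :: d :: t).getD i ' ' == (b :: c :: d :: t).getD (i+1) ' ' &&
        (b :: c :: d :: t).getD (i+1) ' ' == (b :: c :: d :: t).getD (i+2) ' ' &&
        (b :: c :: d :: t).getD (i+2) ' ' == (b :: c :: d :: t).getD (i+3) ' ') := by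
      funext i; rfl
    rw [hfun]
    have htail : (List.range t.length).any (fun i : ℕ =>
        (b :: c :: d :: t).getD i ' ' == (b :: c :: d :: t).getD (i+1) ' ' &&
        (b :: c :: d :: t).getD (i+1) ' ' == (b :: c :: d :: t).getD (i+2) ' ' &&
        (b :: c :: d :: t).getD (i+2) ' ' == (b :: c :: d :: t).getD (i+3) ' ')
        = pvWin4 (b :: c :: d :: t) := by
      rw [← ih]
      match t with
      | [] => rfl
      | x :: t' =>
        have h4 : 4 ≤ (b :: c :: d :: x :: t').length := by simp
        simp only [pvRuleA, if_pos h4]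
        congr 1
    rw [htail]
    rfl

-- ===== VERDICT (by name: the statement is the Claim_ definition above) =====
theorem is_proper_noun_or_fantasy_word_spec : Claim_equal_is_proper_noun_or_fantasy_word := by
  intro word _
  unfold Spec_is_proper_noun_or_fantasy_word
  unfold is_proper_noun_or_fantasy_word is_proper_noun_or_fantasy_word_alt
  rcases hw : word.toList with _ | ⟨c, _ | ⟨c2, rest⟩⟩
  · simp
  · simp
  · simp only
    have hlen : ¬ ((c :: c2 :: rest).length < 2) := by simp
    rw [if_neg hlen]
    have h0 : (c :: c2 :: rest).getD 0 ' ' = c := rfl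
    rw [h0]
    by_cases hu : PySem.Chars.isupper c = true
    · simp [hu]
    · simp only [hu, if_false, Bool.false_eq_true]
      by_cases hsp : ((c :: c2 :: rest).contains '-' || (c :: c2 :: rest).contains '\'') = true
      · simp only [hsp]
        simp
      · simp only [hsp, if_false, Bool.false_eq_true]
        have := pvRunScan_eq_win4 (c2 :: rest) c 1 (by omega) (by omega)
        rw [show (List.replicate 1 c ++ c2 :: rest) = c :: c2 :: rest from rfl] at this
        rw [this, ← pvRuleA_eq_win4]
        rfl
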